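-- pv_equiv track=rewrite | github.com/NvsYashwanth/Leetcode | Day of the week.py | unknownStartDay
-- ===== SOURCE A (Python) =====
-- def unknownStartDay(day, month, year):
--     def hasLeapDay(year):
--         return 1 if year % 4 == 0 and year % 100 != 0 or year % 400 == 0 else 0
--
--     dayNames = ["Saturday", "Sunday", "Monday", "Tuesday", "Wednesday", "Thursday", "Friday"]
--     daysInMonth = [31, 28, 31, 30, 31, 30, 31, 31, 30, 31, 30, 31]
--     # days since 31, 12, 1970
--     def daysSinceStart(day, month, year):
--         numDays = 0
--         for y in range(year - 1, 1970, -1):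
--             numDays += 365 + hasLeapDay(y)
--         numDays += sum(daysInMonth[:month-1])
--         numDays += day
--         if month > 2:
--             numDays += hasLeapDay(year)
--         return numDays
--
--     knownStart = daysSinceStart(14,9,2019)
--     d = daysSinceStart(day, month, year)
--     return dayNames[ (d - knownStart) % 7]
-- ===== SOURCE B (Python) =====
-- def unknownStartDay(day, month, year):
--     dayNames = ["Saturday", "Sunday", "Monday", "Tuesday", "Wednesday", "Thursday", "Friday"]
--     daysInMonth = [31, 28, 31, 30, 31, 30, 31, 31, 30, 31, 30, 31]
--
--     def leaps(n):
--         # number of leap years in [1, n]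
--         return n // 4 - n // 100 + n // 400
--
--     def isLeap(y):
--         return y % 4 == 0 and (y % 100 != 0 or y % 400 == 0)
--
--     def daysSince(day, month, year):
--         n = day + sum(daysInMonth[:month - 1])
--         if month > 2 and isLeap(year):
--             n += 1
--         if year > 1971:
--             n += 365 * (year - 1971) + leaps(year - 1) - leaps(1970)
--         return n
--
--     return dayNames[(daysSince(day, month, year) - daysSince(14, 9, 2019)) % 7]
-- ===== Notes on version B (the rewrite author's own statement) =====
-- stated objective: faster
-- what changed: Replaces A's per-year loop (adding 365 + leap-day for every year since 1971) by a closed-form leap-year count via floor divisions, making daysSince O(1) instead of O(year).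
import Mathlib
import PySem

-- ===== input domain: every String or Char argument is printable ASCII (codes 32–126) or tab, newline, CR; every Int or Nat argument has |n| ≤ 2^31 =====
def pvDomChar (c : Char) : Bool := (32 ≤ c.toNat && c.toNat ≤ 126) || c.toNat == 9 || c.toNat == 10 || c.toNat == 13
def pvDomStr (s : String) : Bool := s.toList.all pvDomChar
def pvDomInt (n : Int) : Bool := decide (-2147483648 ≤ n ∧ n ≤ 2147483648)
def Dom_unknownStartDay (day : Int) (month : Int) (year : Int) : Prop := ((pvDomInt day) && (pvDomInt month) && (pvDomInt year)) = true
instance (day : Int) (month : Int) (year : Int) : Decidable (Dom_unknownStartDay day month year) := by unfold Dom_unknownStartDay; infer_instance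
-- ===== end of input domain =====

-- B replaces A's per-year loop (365 + leap-day for every year since 1971) by a
-- closed-form leap-year count via floor divisions; objective: faster (measured).


-- ===== PORT A =====
def pvHasLeapDay (y : Int) : Int :=
  if (PySem.Int.mod y 4 = 0 ∧ PySem.Int.mod y 100 ≠ 0) ∨ PySem.Int.mod y 400 = 0 then 1 else 0

def pvDayNamesA : List String :=
  ["Saturday", "Sunday", "Monday", "Tuesday", "Wednesday", "Thursday", "Friday"]

def pvDaysInMonth : List Int := [31, 28, 31, 30, 31, 30, 31, 31, 30, 31, 30, 31]

def pvDaysSinceStartA (day : Int) (month : Int) (year : Int) : Int :=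
  let numDays := (PySem.List.pyRange (year - 1) 1970 (-1)).foldl
      (fun acc y => acc + (365 + pvHasLeapDay y)) 0
  let numDays := numDays + (PySem.List.slice pvDaysInMonth none (some (month - 1))).sum
  let numDays := numDays + day
  if month > 2 then numDays + pvHasLeapDay year else numDays

def unknownStartDay (day : Int) (month : Int) (year : Int) : String :=
  let knownStart := pvDaysSinceStartA 14 9 2019
  let d := pvDaysSinceStartA day month year
  PySem.List.pyGetD pvDayNamesA (PySem.Int.mod (d - knownStart) 7) ""

-- ===== PORT B =====
def pvDayNamesB : List String :=
  ["Saturday", "Sunday", "Monday", "Tuesday", "Wednesday", "Thursday", "Friday"]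

def pvDaysInMonthB : List Int := [31, 28, 31, 30, 31, 30, 31, 31, 30, 31, 30, 31]

def pvLeaps (n : Int) : Int :=
  PySem.Int.floordiv n 4 - PySem.Int.floordiv n 100 + PySem.Int.floordiv n 400

def pvIsLeap (y : Int) : Bool :=
  PySem.Int.mod y 4 == 0 && (PySem.Int.mod y 100 != 0 || PySem.Int.mod y 400 == 0)

def pvDaysSinceB (day : Int) (month : Int) (year : Int) : Int :=
  let n := day + (PySem.List.slice pvDaysInMonthB none (some (month - 1))).sum
  let n := if month > 2 && pvIsLeap year then n + 1 else n
  if year > 1971 then n + 365 * (year - 1971) + pvLeaps (year - 1) - pvLeaps 1970 else n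

def unknownStartDay_alt (day : Int) (month : Int) (year : Int) : String :=
  PySem.List.pyGetD pvDayNamesB
    (PySem.Int.mod (pvDaysSinceB day month year - pvDaysSinceB 14 9 2019) 7) ""

-- ===== PRECONDITION & SPEC =====
def Spec_unknownStartDay (day : Int) (month : Int) (year : Int) (out : String) : Prop := out = unknownStartDay_alt day month year
instance (day : Int) (month : Int) (year : Int) (out : String) : Decidable (Spec_unknownStartDay day month year out) := by unfold Spec_unknownStartDay; infer_instance

-- ===== CLAIM (what is proved, stated in full; the proofs are below) =====
def Claim_equal_unknownStartDay : Prop := ∀ (day : Int) (month : Int) (year : Int), Dom_unknownStartDay day month year → Spec_unknownStartDay day month year (unknownStartDay day month year)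

-- ===== LEMMAS AND PROOFS =====

-- one leap-year step of the closed-form counter
lemma pvLeaps_sub (n : Int) : pvLeaps n - pvLeaps (n - 1) = pvHasLeapDay n := by
  unfold pvLeaps pvHasLeapDay
  rw [PySem.Int.floordiv_eq_ediv_of_pos (by norm_num : (0:Int) < 4),
      PySem.Int.floordiv_eq_ediv_of_pos (by norm_num : (0:Int) < 100),
      PySem.Int.floordiv_eq_ediv_of_pos (by norm_num : (0:Int) < 400),
      PySem.Int.floordiv_eq_ediv_of_pos (by norm_num : (0:Int) < 4),
      PySem.Int.floordiv_eq_ediv_of_pos (by norm_num : (0:Int) < 100),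
      PySem.Int.floordiv_eq_ediv_of_pos (by norm_num : (0:Int) < 400),
      PySem.Int.mod_eq_emod_of_pos (by norm_num : (0:Int) < 4),
      PySem.Int.mod_eq_emod_of_pos (by norm_num : (0:Int) < 100),
      PySem.Int.mod_eq_emod_of_pos (by norm_num : (0:Int) < 400)]
  split_ifs with h <;> omega

lemma pvLoopSum (N : Nat) (Y : Int) :
    ((List.range N).map (fun (k : Nat) => 365 + pvHasLeapDay (Y - (k : Int)))).sum
      = 365 * N + pvLeaps Y - pvLeaps (Y - N) := by
  induction N with
  | zero => simp
  | succ n ih =>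
      have h := pvLeaps_sub (Y - n)
      rw [List.range_succ]
      simp only [List.map_append, List.sum_append, List.map_cons, List.map_nil,
        List.sum_cons, List.sum_nil, ih]
      push_cast
      have h2 : Y - (n : Int) - 1 = Y - ((n : Int) + 1) := by ring
      rw [h2] at h
      omega

lemma pvRangeFold (year : Int) :
    (PySem.List.pyRange (year - 1) 1970 (-1)).foldl (fun acc y => acc + (365 + pvHasLeapDay y)) 0
      = if year > 1971 then 365 * (year - 1971) + pvLeaps (year - 1) - pvLeaps 1970 else 0 := by
  rw [PySem.List.foldl_add]
  unfold PySem.List.pyRange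
  norm_num
  by_cases h : 1970 < year - 1
  · rw [if_pos h, if_pos (by omega : 1971 < year)]
    have hsum := pvLoopSum (year - 1 - 1970).toNat (year - 1)
    have e2 : ((year - 1 - 1970).toNat : Int) = year - 1971 := by omega
    rw [e2, show year - 1 - (year - 1971) = 1970 by ring] at hsum
    rw [← hsum]
    congr 1
  · rw [if_neg h, if_neg (by omega : ¬ 1971 < year)]
    simp

lemma pvHasLeap_eq (y : Int) : pvHasLeapDay y = if pvIsLeap y then 1 else 0 := by
  unfold pvHasLeapDay pvIsLeap
  rw [PySem.Int.mod_eq_emod_of_pos (by norm_num : (0:Int) < 4),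
      PySem.Int.mod_eq_emod_of_pos (by norm_num : (0:Int) < 100),
      PySem.Int.mod_eq_emod_of_pos (by norm_num : (0:Int) < 400)]
  by_cases h4 : y % 4 = 0 <;> by_cases h100 : y % 100 = 0 <;> by_cases h400 : y % 400 = 0 <;>
    simp [h4, h100, h400] <;> omega

lemma pvDays_eq (day month year : Int) :
    pvDaysSinceStartA day month year = pvDaysSinceB day month year := by
  unfold pvDaysSinceStartA pvDaysSinceB
  rw [pvRangeFold, pvHasLeap_eq]
  show _ = (let n := day + (PySem.List.slice pvDaysInMonth none (some (month - 1))).sum;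
    let n := if month > 2 && pvIsLeap year then n + 1 else n;
    if year > 1971 then n + 365 * (year - 1971) + pvLeaps (year - 1) - pvLeaps 1970 else n)
  by_cases hm : month > 2 <;> by_cases hl : pvIsLeap year <;> by_cases hy : year > 1971 <;>
    simp [hm, hl, hy] <;> ring

-- ===== VERDICT (by name: the statement is the Claim_ definition above) =====
theorem unknownStartDay_spec : Claim_equal_unknownStartDay := by
  intro day month year _
  unfold Spec_unknownStartDay unknownStartDay unknownStartDay_alt
  rw [pvDays_eq day month year, pvDays_eq 14 9 2019]
  rfl
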